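-- pv_equiv track=rewrite | github.com/pralinkhaira/Project-Wizard | Geeks For Geeks Solutions/Predict the Column/predict-the-column.py | columnWithMaxZeros
-- ===== SOURCE A (Python) =====
-- def columnWithMaxZeros(arr,N):
--     ans=-1
--     res=N
--     for i in range(N):
--         temp=0
--         for j in range(N):
--             temp+=arr[j][i]
--         if temp<res:
--             res=temp
--             ans=i
--     return ans
-- ===== SOURCE B (Python) =====
-- def columnWithMaxZeros(arr, N):
--     n = N if N > 0 else 0
--     sums = [0] * n
--     for row in arr[:n]:
--         sums = [s + x for s, x in zip(sums, row)]
--     ans = -1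
--     res = N
--     for i, s in enumerate(sums):
--         if s < res:
--             res = s
--             ans = i
--     return ans
-- ===== Notes on version B (the rewrite author's own statement) =====
-- stated objective: alternative
-- what changed: B traverses the matrix row-major, accumulating all N column sums in one pass with element-wise zip addition, then selects the first strictly-minimal sum below the N threshold in a separate scan, instead of A's column-by-column recomputation interleaved with the comparison.
import Mathlib
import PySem

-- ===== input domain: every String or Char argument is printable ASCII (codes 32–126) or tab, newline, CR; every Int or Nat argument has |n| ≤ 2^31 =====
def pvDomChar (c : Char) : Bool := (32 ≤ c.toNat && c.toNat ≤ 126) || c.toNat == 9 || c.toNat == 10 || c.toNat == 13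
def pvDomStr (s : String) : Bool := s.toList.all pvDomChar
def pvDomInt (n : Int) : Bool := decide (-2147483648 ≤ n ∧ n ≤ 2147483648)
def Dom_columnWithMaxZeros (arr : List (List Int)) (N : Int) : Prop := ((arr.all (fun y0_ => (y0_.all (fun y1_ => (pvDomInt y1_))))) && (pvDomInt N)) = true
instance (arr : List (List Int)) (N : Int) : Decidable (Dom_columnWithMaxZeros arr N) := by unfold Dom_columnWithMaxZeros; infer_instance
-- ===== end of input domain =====

-- B accumulates all N column sums in one row-major pass (zip addition), then selects the first
-- strict minimum below the N threshold in a second scan (alternative decomposition, same cost).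

-- ===== PORT A =====
def columnWithMaxZeros (arr : List (List Int)) (N : Int) : Int :=
  -- state (ans, res); arr[j][i] via pyGetD, in range under Pre_
  (((PySem.List.pyRange 0 N 1).foldl
    (fun (st : Int × Int) i =>
      let temp := (PySem.List.pyRange 0 N 1).foldl
        (fun temp j => temp + PySem.List.pyGetD (PySem.List.pyGetD arr j []) i 0) 0
      if temp < st.2 then (i, temp) else st)
    (-1, N))).1

-- ===== PORT B =====
def columnWithMaxZeros_alt (arr : List (List Int)) (N : Int) : Int :=
  let n : Nat := (if N > 0 then N else 0).toNat
  let sums := (arr.take n).foldl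
    (fun sums row => (sums.zip row).map (fun p => p.1 + p.2))
    (List.replicate n 0)
  (((PySem.List.enumerate sums).foldl
    (fun (st : Int × Int) p => if p.2 < st.2 then (p.1, p.2) else st)
    (-1, N))).1

-- ===== PRECONDITION & SPEC =====
-- exactly the inputs where A raises no IndexError: every access arr[j][i] (j, i < N) is in range
def Pre_columnWithMaxZeros (arr : List (List Int)) (N : Int) : Prop :=
  N ≤ (arr.length : Int) ∧ ∀ row ∈ arr.take N.toNat, N ≤ (row.length : Int)
instance (arr : List (List Int)) (N : Int) : Decidable (Pre_columnWithMaxZeros arr N) := by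
  unfold Pre_columnWithMaxZeros; infer_instance
def pvWitness_columnWithMaxZeros : List (List Int) × Int := ([[0, 1], [1, 0]], 2)

def Spec_columnWithMaxZeros (arr : List (List Int)) (N : Int) (out : Int) : Prop := out = columnWithMaxZeros_alt arr N
instance (arr : List (List Int)) (N : Int) (out : Int) : Decidable (Spec_columnWithMaxZeros arr N out) := by unfold Spec_columnWithMaxZeros; infer_instance

-- ===== CLAIM (what is proved, stated in full; the proofs are below) =====
def Claim_equal_columnWithMaxZeros : Prop := ∀ (arr : List (List Int)) (N : Int), Dom_columnWithMaxZeros arr N → Pre_columnWithMaxZeros arr N → Spec_columnWithMaxZeros arr N (columnWithMaxZeros arr N)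

-- ===== LEMMAS AND PROOFS =====

-- the first n rows of arr, as indexed reads
lemma take_eq_map_range (arr : List (List Int)) (n : Nat) (h : n ≤ arr.length) :
    arr.take n = (List.range n).map (fun j => arr.getD j []) := by
  apply List.ext_getElem
  · simp [Nat.min_eq_left h]
  · intro i h1 h2
    simp at h1 h2 ⊢
    rw [List.getElem?_eq_getElem (by omega)]
    rfl

lemma enumerate_eq_map_range (xs : List Int) :
    ∀ s : Int, PySem.List.enumerate xs s
      = (List.range xs.length).map (fun (k : Nat) => (s + (k : Int), xs.getD k 0)) := by
  induction xs with
  | nil => simp [PySem.List.enumerate_nil]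
  | cons x xs ih =>
    intro s
    rw [PySem.List.enumerate_cons, ih]
    simp [List.range_succ_eq_map, List.map_map, Function.comp]
    intro a _
    ring

-- the zip-add accumulation: length is preserved and entry k is the column-k sum
lemma foldl_zipAdd_getD (rows : List (List Int)) :
    ∀ (s : List Int), (∀ r ∈ rows, s.length ≤ r.length) →
      (rows.foldl (fun s r => (s.zip r).map (fun p => p.1 + p.2)) s).length = s.length ∧
      ∀ k, k < s.length →
        (rows.foldl (fun s r => (s.zip r).map (fun p => p.1 + p.2)) s).getD k 0
          = s.getD k 0 + (rows.map (fun r => r.getD k 0)).sum := by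
  induction rows with
  | nil => intro s _; simp
  | cons r rows ih =>
    intro s hlen
    have hr : s.length ≤ r.length := hlen r (by simp)
    have hslen : ((s.zip r).map (fun p => p.1 + p.2)).length = s.length := by
      simp [Nat.min_eq_left hr]
    obtain ⟨ihl, ihg⟩ := ih ((s.zip r).map (fun p => p.1 + p.2))
      (by intro r' hr'; rw [hslen]; exact hlen r' (by simp [hr']))
    simp only [List.foldl_cons]
    refine ⟨by rw [ihl, hslen], ?_⟩
    intro k hk
    rw [ihg k (by omega)]
    have hz : ((s.zip r).map (fun p => p.1 + p.2)).getD k 0 = s.getD k 0 + r.getD k 0 := by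
      rw [List.getD_eq_getElem _ _ (by omega), List.getD_eq_getElem _ _ hk,
          List.getD_eq_getElem _ _ (by omega)]
      simp
    rw [hz]
    simp; ring

lemma ports_agree (arr : List (List Int)) (N : Int)
    (h1 : N ≤ (arr.length : Int)) (h2 : ∀ row ∈ arr.take N.toNat, N ≤ (row.length : Int)) :
    columnWithMaxZeros arr N = columnWithMaxZeros_alt arr N := by
  by_cases hN : 0 < N
  · obtain ⟨n, rfl⟩ : ∃ n : Nat, N = (n : Int) := ⟨N.toNat, (Int.toNat_of_nonneg hN.le).symm⟩
    have hn : n ≤ arr.length := by exact_mod_cast h1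
    have hrows : ∀ r ∈ arr.take n, n ≤ r.length := by
      intro r hr
      have := h2 r (by simpa using hr)
      exact_mod_cast this
    -- B's accumulated sums
    set sums := (arr.take n).foldl
      (fun sums row => (sums.zip row).map (fun p => p.1 + p.2))
      (List.replicate n (0 : Int)) with hsums
    obtain ⟨hlen, hget⟩ := foldl_zipAdd_getD (arr.take n) (List.replicate n (0 : Int))
      (by intro r hr; simpa using hrows r hr)
    rw [← hsums] at hlen hget
    simp only [List.length_replicate] at hlen hget
    -- value of column k
    have hval : ∀ k < n, sums.getD k 0
        = ((List.range n).map (fun j => (arr.getD j []).getD k 0)).sum := by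
      intro k hk
      rw [hget k hk, take_eq_map_range arr n hn, List.map_map]
      have : (List.replicate n (0:Int)).getD k 0 = 0 := by
        rw [List.getD_eq_getElem _ _ (by simpa using hk)]; simp
      rw [this, zero_add]
      rfl
    unfold columnWithMaxZeros columnWithMaxZeros_alt
    simp only [if_pos hN, Int.toNat_natCast]
    rw [← hsums]
    rw [enumerate_eq_map_range sums 0, hlen]
    rw [PySem.List.pyRange_zero_nat n, List.foldl_map, List.foldl_map]
    congr 1
    apply PySem.List.foldl_congr_mem
    intro st k hk
    have hk' : k < n := List.mem_range.mp hk
    rw [List.foldl_map, PySem.List.foldl_add]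
    simp only [PySem.List.pyGetD_natCast, zero_add, List.getD_eq_getElem?_getD]
    have hv := hval k hk'
    simp only [List.getD_eq_getElem?_getD] at hv
    rw [← hv]
  · rw [Int.not_lt] at hN
    have h0 : ¬ (0 : Int) < N := by omega
    unfold columnWithMaxZeros columnWithMaxZeros_alt
    rw [PySem.List.pyRange_one_eq_nil hN]
    simp [if_neg h0, PySem.List.enumerate_nil]

-- ===== VERDICT (by name: the statement is the Claim_ definition above) =====
theorem columnWithMaxZeros_spec : Claim_equal_columnWithMaxZeros := by
  intro arr N _ hPre
  unfold Spec_columnWithMaxZeros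
  exact ports_agree arr N hPre.1 hPre.2
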